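-- pv_equiv track=rewrite | github.com/Alvf/Math_Modelling_Final_Project | Elevators.py | crossovers
-- ===== SOURCE A (Python) =====
-- def crossovers(passenger, perm):
--     '''
--     Calculates number of crossover situations in the permutation
--
--     Inputs:
--         passenver (string): name of passenger of interest
--         perm (string tuple): the permutation in question
--
--     Returns: number of crossovers (as described in notes)
--     '''
--     total_cross = 0
--     for i, p in enumerate(perm):
--         if i == 0:
--             continue
--         if passenger == p != perm[i-1]:
--             total_cross +=1
--     return total_cross
-- ===== SOURCE B (Python) =====
-- def crossovers(passenger, perm):
--     # Collapse perm into its run keys (one entry per maximal run of equal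
--     # adjacent elements), then count occurrences of passenger among all runs
--     # except the first: each such run starts a crossover.
--     runs = []
--     for p in perm:
--         if not runs or runs[-1] != p:
--             runs.append(p)
--     return runs[1:].count(passenger)
-- ===== Notes on version B (the rewrite author's own statement) =====
-- stated objective: alternative
-- what changed: B compresses perm into its list of run keys (maximal runs of equal adjacent elements) and counts occurrences of passenger among the runs after the first, instead of testing every adjacent index pair perm[i-1]/perm[i].
import Mathlib
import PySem

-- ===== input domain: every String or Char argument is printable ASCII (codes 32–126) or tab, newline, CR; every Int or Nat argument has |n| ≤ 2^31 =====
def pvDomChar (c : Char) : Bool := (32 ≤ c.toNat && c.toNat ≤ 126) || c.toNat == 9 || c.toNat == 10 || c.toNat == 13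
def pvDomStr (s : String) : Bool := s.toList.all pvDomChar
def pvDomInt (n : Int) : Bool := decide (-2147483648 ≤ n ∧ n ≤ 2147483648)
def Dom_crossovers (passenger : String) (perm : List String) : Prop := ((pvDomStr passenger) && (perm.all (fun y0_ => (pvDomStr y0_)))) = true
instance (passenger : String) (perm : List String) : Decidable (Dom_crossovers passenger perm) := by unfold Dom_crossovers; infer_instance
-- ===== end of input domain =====

-- B collapses perm into its run keys and counts passenger among the runs after the first,
-- instead of testing each adjacent index pair; same cost, different decomposition (objective: alternative).


-- ===== PORT A =====
-- loop body of A: 'if i == 0: continue; if passenger == p != perm[i-1]: total_cross += 1'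
-- (perm[i-1] via pyGet?; the none branch is unreachable since 1 ≤ i < len(perm))
def stepA (passenger : String) (perm : List String) (total_cross : Int) (ip : Int × String) : Int :=
  if ip.1 = 0 then total_cross
  else
    match PySem.List.pyGet? perm (ip.1 - 1) with
    | some q => if passenger = ip.2 ∧ ip.2 ≠ q then total_cross + 1 else total_cross
    | none => total_cross

def crossovers (passenger : String) (perm : List String) : Int :=
  (PySem.List.enumerate perm).foldl (stepA passenger perm) 0

-- ===== PORT B =====
-- 'if not runs or runs[-1] != p: runs.append(p)'
def stepB (runs : List String) (p : String) : List String :=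
  if runs = [] ∨ runs.getLast? ≠ some p then runs ++ [p] else runs

def crossovers_alt (passenger : String) (perm : List String) : Int :=
  let runs := perm.foldl stepB []
  ((PySem.List.count (runs.drop 1) passenger : Nat) : Int)

-- ===== PRECONDITION & SPEC =====
def Spec_crossovers (passenger : String) (perm : List String) (out : Int) : Prop := out = crossovers_alt passenger perm
instance (passenger : String) (perm : List String) (out : Int) : Decidable (Spec_crossovers passenger perm out) := by unfold Spec_crossovers; infer_instance

-- ===== CLAIM (what is proved, stated in full; the proofs are below) =====
def Claim_equal_crossovers : Prop := ∀ (passenger : String) (perm : List String), Dom_crossovers passenger perm → Spec_crossovers passenger perm (crossovers passenger perm)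

-- ===== LEMMAS AND PROOFS =====

-- pairwise crossover count: reference form both ports are reduced to
def countA (passenger prev : String) : List String → Int
  | [] => 0
  | y :: ys => (if passenger = y ∧ y ≠ prev then 1 else 0) + countA passenger y ys

-- run keys after the first element, recursively
def collapse (prev : String) : List String → List String
  | [] => []
  | y :: ys => if y = prev then collapse prev ys else y :: collapse y ys

theorem foldA_eq (passenger : String) :
    ∀ (l pre : List String) (prev : String) (acc : Int),
    (PySem.List.enumerate l ((pre.length : Int) + 1)).foldl
        (stepA passenger (pre ++ prev :: l)) acc = acc + countA passenger prev l := by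
  intro l
  induction l with
  | nil => intro pre prev acc; simp [PySem.List.enumerate, countA]
  | cons y ys ih =>
    intro pre prev acc
    rw [PySem.List.enumerate_cons, List.foldl_cons]
    have hidx : PySem.List.pyGet? (pre ++ prev :: y :: ys) ((pre.length : Int) + 1 - 1)
        = some prev := by
      have : ((pre.length : Int) + 1 - 1) = ((pre.length : Nat) : Int) := by omega
      rw [this, PySem.List.pyGet?_natCast]
      simp
    have hne : ¬ ((pre.length : Int) + 1 = 0) := by omega
    have hstep : stepA passenger (pre ++ prev :: y :: ys) acc ((pre.length : Int) + 1, y)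
        = if passenger = y ∧ y ≠ prev then acc + 1 else acc := by
      simp only [stepA, hne, if_false, hidx]
    rw [hstep]
    have hlist : pre ++ prev :: y :: ys = (pre ++ [prev]) ++ y :: ys := by simp
    have hlen : ((pre.length : Int) + 1 + 1) = (((pre ++ [prev]).length : Nat) : Int) + 1 := by
      simp
    rw [hlist, hlen, ih (pre ++ [prev]) y]
    simp only [countA]
    split_ifs <;> omega

theorem crossovers_eq_countA (passenger : String) : ∀ (perm : List String),
    crossovers passenger perm
      = (match perm with | [] => 0 | x :: xs => countA passenger x xs) := by
  intro perm
  cases perm with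
  | nil => rfl
  | cons x xs =>
    show (PySem.List.enumerate (x :: xs) 0).foldl (stepA passenger (x :: xs)) 0 = _
    rw [PySem.List.enumerate_cons, List.foldl_cons]
    have h0 : stepA passenger (x :: xs) 0 (0, x) = 0 := by simp [stepA]
    rw [h0]
    have := foldA_eq passenger xs [] x 0
    simpa using this

theorem foldB_eq : ∀ (l runs : List String) (last : String),
    runs.getLast? = some last →
    l.foldl stepB runs = runs ++ collapse last l := by
  intro l
  induction l with
  | nil => intro runs last _; simp [collapse]
  | cons y ys ih =>
    intro runs last hlast
    have hne : runs ≠ [] := by intro h; rw [h] at hlast; simp at hlast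
    rw [List.foldl_cons]
    by_cases hy : y = last
    · have : stepB runs y = runs := by
        simp [stepB, hne, hlast, hy]
      rw [this, ih runs last hlast, collapse, if_pos hy]
    · have : stepB runs y = runs ++ [y] := by
        have : runs.getLast? ≠ some y := by rw [hlast]; simp [Ne.symm, hy]
        simp [stepB, this]
      rw [this, ih (runs ++ [y]) y (by simp)]
      rw [collapse, if_neg hy]
      simp

theorem pycount_cons (a v : String) (l : List String) :
    PySem.List.count (a :: l) v = PySem.List.count l v + (if a = v then 1 else 0) := by
  simp [PySem.List.count_eq, List.count_cons]

theorem count_collapse (passenger : String) : ∀ (l : List String) (prev : String),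
    ((PySem.List.count (collapse prev l) passenger : Nat) : Int) = countA passenger prev l := by
  intro l
  induction l with
  | nil => intro prev; simp [collapse, countA, PySem.List.count_eq]
  | cons y ys ih =>
    intro prev
    rw [collapse, countA]
    by_cases hy : y = prev
    · rw [if_pos hy]
      have hcond : ¬ (passenger = y ∧ y ≠ prev) := fun h => h.2 hy
      rw [if_neg hcond, hy, ih prev]
      omega
    · rw [if_neg hy, pycount_cons]
      have hIH := ih y
      push_cast
      by_cases hp : passenger = y
      · rw [if_pos (hp.symm), if_pos ⟨hp, hy⟩]
        omega
      · rw [if_neg (fun h => hp h.symm), if_neg (fun h => hp h.1)]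
        omega

theorem alt_eq_countA (passenger : String) : ∀ (perm : List String),
    crossovers_alt passenger perm
      = (match perm with | [] => 0 | x :: xs => countA passenger x xs) := by
  intro perm
  cases perm with
  | nil => rfl
  | cons x xs =>
    show ((PySem.List.count (((x :: xs).foldl stepB []).drop 1) passenger : Nat) : Int) = _
    rw [List.foldl_cons]
    have h1 : stepB [] x = [x] := by simp [stepB]
    rw [h1, foldB_eq xs [x] x (by simp)]
    simp only [List.singleton_append, List.drop_succ_cons, List.drop_zero]
    exact count_collapse passenger xs x

-- ===== VERDICT (by name: the statement is the Claim_ definition above) =====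
theorem crossovers_spec : Claim_equal_crossovers := by
  intro passenger perm _
  show crossovers passenger perm = crossovers_alt passenger perm
  rw [crossovers_eq_countA, alt_eq_countA]
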